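-- pv_equiv track=rewrite | github.com/aimasteracc/tree-sitter-analyzer | tree_sitter_analyzer_v2/languages/java_parser.py | _detect_framework_type
-- ===== SOURCE A (Python) =====
-- from typing import Any
--
-- def _detect_framework_type(annotations: list[dict[str, Any]]) -> str | None:
--     """
--     Detect primary framework from annotations.
--
--     Priority: spring-web > spring > jpa > lombok
--
--     Args:
--         annotations: List of annotation dicts with "type" field
--
--     Returns:
--         Primary framework type or None
--     """
--     types = {ann["type"] for ann in annotations}
--
--     if "spring-web" in types:
--         return "spring-web"
--     elif "spring" in types:
--         return "spring"
--     elif "jpa" in types: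
--         return "jpa"
--     elif "lombok" in types:
--         return "lombok"
--
--     return None
-- ===== SOURCE B (Python) =====
-- _RANK = {"spring-web": 0, "spring": 1, "jpa": 2, "lombok": 3}
-- _NAME = {0: "spring-web", 1: "spring", 2: "jpa", 3: "lombok"}
--
-- def _detect_framework_type(annotations):
--     """Single pass keeping the lowest-rank framework seen so far."""
--     best = 4
--     for ann in annotations:
--         best = min(best, _RANK.get(ann["type"], 4))
--     return _NAME.get(best)
-- ===== Notes on version B (the rewrite author's own statement) =====
-- stated objective: alternative
-- what changed: Replaces the set comprehension plus four-way membership if-chain by a single fold that keeps the minimum priority rank seen, decoded to a name at the end.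
import Mathlib
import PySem

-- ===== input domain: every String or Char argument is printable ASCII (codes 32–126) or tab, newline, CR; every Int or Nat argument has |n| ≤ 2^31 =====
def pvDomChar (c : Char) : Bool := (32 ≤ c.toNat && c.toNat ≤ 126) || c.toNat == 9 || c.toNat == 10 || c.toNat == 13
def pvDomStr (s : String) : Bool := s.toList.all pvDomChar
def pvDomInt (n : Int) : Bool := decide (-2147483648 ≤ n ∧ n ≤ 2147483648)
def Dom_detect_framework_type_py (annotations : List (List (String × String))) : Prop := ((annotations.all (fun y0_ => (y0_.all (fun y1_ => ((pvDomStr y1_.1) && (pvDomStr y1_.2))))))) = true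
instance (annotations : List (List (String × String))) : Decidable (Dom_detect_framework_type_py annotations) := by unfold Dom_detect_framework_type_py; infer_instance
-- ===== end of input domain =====

-- B replaces the set comprehension + four-way membership if-chain by one fold keeping the minimum
-- priority rank seen, decoded at the end (objective: alternative decomposition, same cost).

-- ===== PORT A =====
-- ann["type"]: first-match association-list lookup; total form getD "" is only relied on inside
-- Pre_ (which guarantees the key exists, as Python raises KeyError otherwise).
def pyTypeOf (ann : List (String × String)) : String := (List.lookup "type" ann).getD ""

def detect_framework_type_py (annotations : List (List (String × String))) : Option String :=
  let types : PySem.Set String := PySem.Set.ofList (annotations.map pyTypeOf)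
  if PySem.Set.contains types "spring-web" then some "spring-web"
  else if PySem.Set.contains types "spring" then some "spring"
  else if PySem.Set.contains types "jpa" then some "jpa"
  else if PySem.Set.contains types "lombok" then some "lombok"
  else none

-- ===== PORT B =====
-- _RANK.get(t, 4)
def rankOf (t : String) : Nat :=
  if t = "spring-web" then 0 else if t = "spring" then 1
  else if t = "jpa" then 2 else if t = "lombok" then 3 else 4

-- _NAME.get(best)
def nameOf (r : Nat) : Option String :=
  if r = 0 then some "spring-web" else if r = 1 then some "spring"
  else if r = 2 then some "jpa" else if r = 3 then some "lombok" else none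

def detect_framework_type_py_alt (annotations : List (List (String × String))) : Option String :=
  nameOf (annotations.foldl (fun best ann => min best (rankOf ((List.lookup "type" ann).getD ""))) 4)

-- ===== PRECONDITION & SPEC =====
-- Pre_: every annotation dict has a "type" key; on the others Python's ann["type"] raises KeyError (in both A and B).
def Pre_detect_framework_type_py (annotations : List (List (String × String))) : Prop :=
  ∀ ann ∈ annotations, (List.lookup "type" ann).isSome

instance (annotations : List (List (String × String))) : Decidable (Pre_detect_framework_type_py annotations) := by
  unfold Pre_detect_framework_type_py; infer_instance

def pvWitness_detect_framework_type_py : (List (List (String × String))) :=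
  [[("type", "lombok")], [("type", "spring"), ("x", "y")]]

def Spec_detect_framework_type_py (annotations : List (List (String × String))) (out : Option String) : Prop := out = detect_framework_type_py_alt annotations
instance (annotations : List (List (String × String))) (out : Option String) : Decidable (Spec_detect_framework_type_py annotations out) := by unfold Spec_detect_framework_type_py; infer_instance

-- ===== CLAIM (what is proved, stated in full; the proofs are below) =====
def Claim_equal_detect_framework_type_py : Prop := ∀ (annotations : List (List (String × String))), Dom_detect_framework_type_py annotations → Pre_detect_framework_type_py annotations → Spec_detect_framework_type_py annotations (detect_framework_type_py annotations)

-- ===== LEMMAS AND PROOFS =====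

-- the rank of the highest-priority framework present in ts
def minRank (ts : List String) : Nat :=
  if "spring-web" ∈ ts then 0 else if "spring" ∈ ts then 1
  else if "jpa" ∈ ts then 2 else if "lombok" ∈ ts then 3 else 4

set_option maxHeartbeats 2000000 in
lemma minRank_cons (t : String) (ts : List String) :
    minRank (t :: ts) = min (rankOf t) (minRank ts) := by
  simp only [minRank, rankOf, List.mem_cons]
  by_cases h0 : t = "spring-web" <;> by_cases h1 : t = "spring" <;>
    by_cases h2 : t = "jpa" <;> by_cases h3 : t = "lombok" <;>
    simp_all <;> split_ifs <;> simp_all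

lemma minRank_le (ts : List String) : minRank ts ≤ 4 := by
  unfold minRank; split_ifs <;> omega

lemma foldl_min_rank (ts : List String) (b : Nat) (hb : b ≤ 4) :
    ts.foldl (fun best t => min best (rankOf t)) b = min b (minRank ts) := by
  induction ts generalizing b with
  | nil => simp [minRank]; omega
  | cons t ts ih =>
    have hr : rankOf t ≤ 4 := by unfold rankOf; split_ifs <;> omega
    rw [List.foldl_cons]
    rw [ih (min b (rankOf t)) (by omega), minRank_cons]
    omega

-- ===== VERDICT (by name: the statement is the Claim_ definition above) =====
theorem detect_framework_type_py_spec : Claim_equal_detect_framework_type_py := by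
  intro annotations _ _
  unfold Spec_detect_framework_type_py detect_framework_type_py detect_framework_type_py_alt
  have hfold : annotations.foldl (fun best ann => min best (rankOf ((List.lookup "type" ann).getD ""))) 4
      = minRank (annotations.map pyTypeOf) := by
    have := foldl_min_rank (annotations.map pyTypeOf) 4 (by omega)
    rw [List.foldl_map] at this
    have h4 : min 4 (minRank (annotations.map pyTypeOf)) = minRank (annotations.map pyTypeOf) := by
      have := minRank_le (annotations.map pyTypeOf); omega
    rw [h4] at this
    simpa [pyTypeOf] using this
  rw [hfold]
  simp only [PySem.Set.contains_iff, PySem.Set.mem_ofList, minRank, nameOf]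
  split_ifs <;> simp_all
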